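-- pv_equiv track=rewrite | github.com/Lord225/Lord-s-asm-for-mc | core/parse/tokenize.py | join_quote_str
-- ===== SOURCE A (Python) =====
-- def join_quote_str(tokens):
--     state = False
--     output = list()
--     joined = ""
--     for i in range(len(tokens)):
--         if tokens[i] == '"':
--             if state:
--                 output.append(f'"{joined}"')
--                 joined = ""
--             state = not state
--             continue
--         if state:
--             joined += tokens[i]
--         else:
--             output.append(tokens[i])
--     return output
-- ===== SOURCE B (Python) =====
-- def join_quote_str(tokens):
--     output = []
--     n = len(tokens)
--     i = 0
--     while i < n:
--         if tokens[i] == '"':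
--             j = i + 1
--             collected = []
--             while j < n and tokens[j] != '"':
--                 collected.append(tokens[j])
--                 j += 1
--             if j < n:
--                 output.append('"' + ''.join(collected) + '"')
--             i = j + 1
--         else:
--             output.append(tokens[i])
--             i += 1
--     return output
-- ===== Notes on version B (the rewrite author's own statement) =====
-- stated objective: alternative
-- what changed: Replaced the flag-toggling single pass with accumulating string concatenation by an index-driven outer loop that, on seeing a quote, runs an inner scan to the matching closing quote, joins the collected tokens once, and jumps past it (silently dropping an unterminated quote, like A).
import Mathlib
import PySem

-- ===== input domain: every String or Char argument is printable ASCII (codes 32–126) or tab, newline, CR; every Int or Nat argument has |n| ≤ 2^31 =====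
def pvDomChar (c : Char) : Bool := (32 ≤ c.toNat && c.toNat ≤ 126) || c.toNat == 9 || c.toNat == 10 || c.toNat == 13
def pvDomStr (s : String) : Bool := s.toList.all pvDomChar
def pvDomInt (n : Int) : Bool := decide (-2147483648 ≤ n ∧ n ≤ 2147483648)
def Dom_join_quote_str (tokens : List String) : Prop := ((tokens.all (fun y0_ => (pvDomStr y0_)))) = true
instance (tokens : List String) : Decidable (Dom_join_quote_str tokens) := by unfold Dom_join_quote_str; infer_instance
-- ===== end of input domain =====

-- B replaces A's flag-toggling single pass by an outer index loop with an inner scan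
-- to the matching closing quote (alternative decomposition, same cost).

-- ===== PORT A =====
-- state machine step: state = (inside-quotes flag, output, joined)
def jqsStepA (s : Bool × List String × String) (t : String) : Bool × List String × String :=
  if t = "\"" then
    if s.1 then (!s.1, s.2.1 ++ ["\"" ++ s.2.2 ++ "\""], "")
    else (!s.1, s.2.1, s.2.2)
  else if s.1 then (s.1, s.2.1, s.2.2 ++ t)
  else (s.1, s.2.1 ++ [t], s.2.2)

def join_quote_str (tokens : List String) : List String :=
  (tokens.foldl jqsStepA (false, [], "")).2.1

-- ===== PORT B =====
-- inner while loop: collect tokens until a closing quote; none = ran off the end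
def jqsScan : List String → Option (List String × List String)
  | [] => none
  | t :: rest =>
    if t = "\"" then some ([], rest)
    else match jqsScan rest with
      | some (c, r) => some (t :: c, r)
      | none => none

-- outer while loop over the index i < n, transcribed with the remaining-length bound as fuel
def jqsGo : Nat → List String → List String
  | 0, _ => []
  | _ + 1, [] => []
  | fuel + 1, t :: rest =>
    if t = "\"" then
      match jqsScan rest with
      | some (c, r) => ("\"" ++ String.join c ++ "\"") :: jqsGo fuel r
      | none => []
    else t :: jqsGo fuel rest

def join_quote_str_alt (tokens : List String) : List String :=
  jqsGo tokens.length tokens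

-- ===== PRECONDITION & SPEC =====
def Spec_join_quote_str (tokens : List String) (out : List String) : Prop := out = join_quote_str_alt tokens
instance (tokens : List String) (out : List String) : Decidable (Spec_join_quote_str tokens out) := by unfold Spec_join_quote_str; infer_instance

-- ===== CLAIM (what is proved, stated in full; the proofs are below) =====
def Claim_equal_join_quote_str : Prop := ∀ (tokens : List String), Dom_join_quote_str tokens → Spec_join_quote_str tokens (join_quote_str tokens)

-- ===== LEMMAS AND PROOFS =====

theorem jqsScan_length : ∀ (xs : List String) (c r : List String),
    jqsScan xs = some (c, r) → r.length < xs.length := by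
  intro xs
  induction xs with
  | nil => intro c r h; simp [jqsScan] at h
  | cons t rest ih =>
    intro c r h
    simp only [jqsScan] at h
    split at h
    · simp at h
      simp [← h.2]
    · cases hs : jqsScan rest with
      | none => rw [hs] at h; simp at h
      | some p =>
        rw [hs] at h
        cases p with
        | mk c' r' =>
          simp at h
          have := ih c' r' hs
          simp [← h.2]
          omega

-- the fuel only bounds the number of outer-loop steps: any fuel ≥ length gives the same list
theorem jqsGo_irrel : ∀ (m : Nat) (ts : List String), ts.length ≤ m →
    ∀ (n : Nat), ts.length ≤ n → jqsGo m ts = jqsGo n ts := by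
  intro m
  induction m with
  | zero =>
    intro ts hts n hn
    have : ts = [] := List.eq_nil_of_length_eq_zero (Nat.le_zero.mp hts)
    subst this
    cases n <;> simp [jqsGo]
  | succ m ih =>
    intro ts hts n hn
    cases ts with
    | nil => cases n <;> simp [jqsGo]
    | cons t rest =>
      cases n with
      | zero => simp at hn
      | succ k =>
        have hm : rest.length ≤ m := by simpa using hts
        have hk : rest.length ≤ k := by simpa using hn
        by_cases ht : t = "\""
        · subst ht
          simp only [jqsGo]
          cases hs : jqsScan rest with
          | none => simp
          | some p =>
            cases p with
            | mk c r =>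
              have hl := jqsScan_length rest c r hs
              simp [ih r (by omega) k (by omega)]
        · simp only [jqsGo, if_neg ht]
          rw [ih rest hm k hk]

theorem jqsStepA_quote_false (out : List String) (j : String) :
    jqsStepA (false, out, j) "\"" = (true, out, j) := by simp [jqsStepA]

theorem jqsStepA_quote_true (out : List String) (j : String) :
    jqsStepA (true, out, j) "\"" = (false, out ++ ["\"" ++ j ++ "\""], "") := by simp [jqsStepA]

theorem jqsStepA_plain_false (out : List String) (j : String) (t : String) (ht : t ≠ "\"") :
    jqsStepA (false, out, j) t = (false, out ++ [t], j) := by simp [jqsStepA, ht]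

theorem jqsStepA_plain_true (out : List String) (j : String) (t : String) (ht : t ≠ "\"") :
    jqsStepA (true, out, j) t = (true, out, j ++ t) := by simp [jqsStepA, ht]

theorem jqs_main : ∀ (ts : List String),
    (∀ out : List String, (ts.foldl jqsStepA (false, out, "")).2.1 = out ++ jqsGo ts.length ts) ∧
    (∀ (out : List String) (j : String),
      (ts.foldl jqsStepA (true, out, j)).2.1 =
        match jqsScan ts with
        | some (c, r) => (out ++ ["\"" ++ (j ++ String.join c) ++ "\""]) ++ jqsGo r.length r
        | none => out) := by
  intro ts
  induction ts with
  | nil =>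
    exact ⟨fun out => by simp [jqsGo], fun out j => by simp [jqsScan]⟩
  | cons t rest ih =>
    constructor
    · intro out
      by_cases ht : t = "\""
      · subst ht
        rw [List.foldl_cons, jqsStepA_quote_false, ih.2 out ""]
        simp only [List.length_cons, jqsGo]
        cases hs : jqsScan rest with
        | none => simp
        | some p =>
          obtain ⟨c, r⟩ := p
          have hl := jqsScan_length rest c r hs
          simp [jqsGo_irrel r.length r le_rfl rest.length (by omega)]
      · rw [List.foldl_cons, jqsStepA_plain_false out "" t ht, ih.1 (out ++ [t])]
        simp only [List.length_cons, jqsGo, if_neg ht]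
        simp
    · intro out j
      by_cases ht : t = "\""
      · subst ht
        rw [List.foldl_cons, jqsStepA_quote_true, ih.1 (out ++ ["\"" ++ j ++ "\""])]
        simp [jqsScan, String.join]
      · rw [List.foldl_cons, jqsStepA_plain_true out j t ht, ih.2 out (j ++ t)]
        simp only [jqsScan, if_neg ht]
        cases hs : jqsScan rest with
        | none => simp
        | some p =>
          obtain ⟨c, r⟩ := p
          have hj : (j ++ t) ++ String.join c = j ++ String.join (t :: c) := by
            simp [String.join_eq, String.append_assoc]
          simp only [hj]

-- ===== VERDICT (by name: the statement is the Claim_ definition above) =====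
theorem join_quote_str_spec : Claim_equal_join_quote_str := by
  intro tokens _
  unfold Spec_join_quote_str join_quote_str join_quote_str_alt
  have h := (jqs_main tokens).1 []
  simpa using h
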